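-- pv_equiv track=rewrite | github.com/jonathonreilly/toy-physics | scripts/frontier_yt_cl3_preservation.py | verify_coarse_is_z3
-- ===== SOURCE A (Python) =====
-- def verify_coarse_is_z3(L_fine):
--     """Verify the coarse lattice has Z^3 nearest-neighbor structure.
--
--     Checks that:
--     - Each coarse site has neighbors along all 3 coordinate axes
--     - Neighbor coordinates = site +/- 1 along each axis (mod L_c)
--     - The connectivity is exactly the Z^3 adjacency
--     Note: for L_c=2 with PBC, +1 and -1 coincide (wrap), giving 3 distinct
--     neighbors. This is a PBC finite-size artifact, not a failure of Z^3
--     structure. The theorem concerns Z^3 geometry (cubic, 3-axis connectivity),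
--     which holds at any L_c >= 2.
--     """
--     L_c = L_fine // 2
--     directions_pos = [(1, 0, 0), (0, 1, 0), (0, 0, 1)]
--     ok = True
--     for x in range(L_c):
--         for y in range(L_c):
--             for z in range(L_c):
--                 # Check: for each axis, the neighbor at +1 (mod L_c) exists
--                 # and is a distinct site from (x,y,z) as long as L_c >= 2
--                 for dx, dy, dz in directions_pos:
--                     nn = ((x + dx) % L_c, (y + dy) % L_c, (z + dz) % L_c)
--                     # nn should differ from (x,y,z) in exactly one coordinate
--                     diffs = (nn[0] != x) + (nn[1] != y) + (nn[2] != z)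
--                     if diffs != 1:
--                         ok = False
--     return ok
-- ===== SOURCE B (Python) =====
-- def verify_coarse_is_z3(L_fine):
--     """Verify the coarse lattice has Z^3 nearest-neighbor structure.
--
--     Closed form: the per-site check fails exactly when L_c == 1 (the only
--     coarse size where (x+1) % L_c == x); for L_c <= 0 the scan is empty and
--     vacuously OK, and for L_c >= 2 every +1 neighbor differs in exactly one
--     coordinate.
--     """
--     return L_fine // 2 != 1
-- ===== Notes on version B (the rewrite author's own statement) =====
-- stated objective: faster
-- what changed: Replaced the O(L_c^3) triple loop over all coarse sites (with an inner scan of 3 directions) by the closed form 'L_fine // 2 != 1', since the adjacency check fails exactly when the coarse size is 1.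
import Mathlib
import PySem

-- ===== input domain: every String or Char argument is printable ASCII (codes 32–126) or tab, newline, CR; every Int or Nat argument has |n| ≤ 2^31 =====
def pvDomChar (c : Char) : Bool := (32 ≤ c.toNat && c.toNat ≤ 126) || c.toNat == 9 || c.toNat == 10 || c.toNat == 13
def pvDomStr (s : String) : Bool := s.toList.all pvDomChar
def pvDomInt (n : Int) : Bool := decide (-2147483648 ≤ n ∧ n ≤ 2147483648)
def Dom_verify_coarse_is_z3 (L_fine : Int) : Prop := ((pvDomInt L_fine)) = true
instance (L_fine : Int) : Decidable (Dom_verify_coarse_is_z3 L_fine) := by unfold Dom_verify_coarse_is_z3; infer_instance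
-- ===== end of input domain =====

-- B replaces A's O(L_c^3) triple scan over coarse sites by the closed form L_fine // 2 != 1 (faster).


-- ===== PORT A =====
def verify_coarse_is_z3 (L_fine : Int) : Bool :=
  let L_c := PySem.Int.floordiv L_fine 2
  let directions_pos : List (Int × Int × Int) := [(1, 0, 0), (0, 1, 0), (0, 0, 1)]
  (PySem.List.pyRange 0 L_c 1).foldl (fun ok x =>
    (PySem.List.pyRange 0 L_c 1).foldl (fun ok y =>
      (PySem.List.pyRange 0 L_c 1).foldl (fun ok z =>
        directions_pos.foldl (fun ok d =>
          let nn : Int × Int × Int :=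
            (PySem.Int.mod (x + d.1) L_c, PySem.Int.mod (y + d.2.1) L_c,
             PySem.Int.mod (z + d.2.2) L_c)
          let diffs : Int :=
            (if nn.1 ≠ x then 1 else 0) + (if nn.2.1 ≠ y then 1 else 0) +
              (if nn.2.2 ≠ z then 1 else 0)
          if diffs ≠ 1 then false else ok) ok) ok) ok) true

-- ===== PORT B =====
def verify_coarse_is_z3_alt (L_fine : Int) : Bool :=
  decide (PySem.Int.floordiv L_fine 2 ≠ 1)

-- ===== PRECONDITION & SPEC =====
def Spec_verify_coarse_is_z3 (L_fine : Int) (out : Bool) : Prop := out = verify_coarse_is_z3_alt L_fine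
instance (L_fine : Int) (out : Bool) : Decidable (Spec_verify_coarse_is_z3 L_fine out) := by unfold Spec_verify_coarse_is_z3; infer_instance

-- ===== CLAIM (what is proved, stated in full; the proofs are below) =====
def Claim_equal_verify_coarse_is_z3 : Prop := ∀ (L_fine : Int), Dom_verify_coarse_is_z3 L_fine → Spec_verify_coarse_is_z3 L_fine (verify_coarse_is_z3 L_fine)

-- ===== LEMMAS AND PROOFS =====

-- a fold whose step fixes every accumulator on every list element is the identity
theorem pv_foldl_fixed_mem {α β : Type} {f : β → α → β} {l : List α}
    (h : ∀ a ∈ l, ∀ b, f b a = b) : ∀ b, l.foldl f b = b := by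
  induction l with
  | nil => intro b; rfl
  | cons a t ih =>
    intro b
    simp only [List.foldl_cons, h a (List.mem_cons_self)]
    exact ih (fun a ha b => h a (List.mem_cons_of_mem _ ha) b) b

theorem pv_mod_self_lt {L a : Int} (h0 : 0 ≤ a) (h1 : a < L) :
    PySem.Int.mod a L = a := by
  rw [PySem.Int.mod_eq_emod_of_pos (by omega)]
  exact Int.emod_eq_of_lt h0 h1

theorem pv_mod_succ_ne {L a : Int} (hL : 2 ≤ L) (h0 : 0 ≤ a) (h1 : a < L) :
    PySem.Int.mod (a + 1) L ≠ a := by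
  rw [PySem.Int.mod_eq_emod_of_pos (by omega)]
  by_cases hx : a = L - 1
  · have : a + 1 = L := by omega
    rw [this, Int.emod_self]
    omega
  · rw [Int.emod_eq_of_lt (by omega) (by omega)]
    omega

-- for L_c = 1 the single site fails the check
theorem pv_verify_eval_one {L_fine : Int} (h : PySem.Int.floordiv L_fine 2 = 1) :
    verify_coarse_is_z3 L_fine = false := by
  simp only [verify_coarse_is_z3, h]
  decide

-- for L_c ≤ 0 the triple loop is empty
theorem pv_verify_eval_nonpos {L_fine : Int} (h : PySem.Int.floordiv L_fine 2 ≤ 0) :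
    verify_coarse_is_z3 L_fine = true := by
  simp only [verify_coarse_is_z3]
  rw [PySem.List.pyRange_one_eq_nil h]
  rfl

-- for L_c ≥ 2 every direction step keeps ok, so the fold is the identity
theorem pv_verify_eval_ge_two {L_fine : Int} (h : 2 ≤ PySem.Int.floordiv L_fine 2) :
    verify_coarse_is_z3 L_fine = true := by
  simp only [verify_coarse_is_z3]
  set L := PySem.Int.floordiv L_fine 2 with hL
  apply pv_foldl_fixed_mem
  intro x hx b
  obtain ⟨hx0, hx1⟩ := (PySem.List.mem_pyRange_one).1 hx
  apply pv_foldl_fixed_mem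
  intro y hy b
  obtain ⟨hy0, hy1⟩ := (PySem.List.mem_pyRange_one).1 hy
  apply pv_foldl_fixed_mem
  intro z hz b
  obtain ⟨hz0, hz1⟩ := (PySem.List.mem_pyRange_one).1 hz
  simp only [List.foldl_cons, List.foldl_nil]
  simp [pv_mod_self_lt hx0 hx1, pv_mod_self_lt hy0 hy1, pv_mod_self_lt hz0 hz1,
    pv_mod_succ_ne h hx0 hx1, pv_mod_succ_ne h hy0 hy1, pv_mod_succ_ne h hz0 hz1]

-- ===== VERDICT (by name: the statement is the Claim_ definition above) =====
theorem verify_coarse_is_z3_spec : Claim_equal_verify_coarse_is_z3 := by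
  intro L_fine _
  unfold Spec_verify_coarse_is_z3 verify_coarse_is_z3_alt
  rcases lt_trichotomy (PySem.Int.floordiv L_fine 2) 1 with h | h | h
  · rw [pv_verify_eval_nonpos (by omega)]
    exact (decide_eq_true (by omega)).symm
  · rw [pv_verify_eval_one h]
    exact (decide_eq_false (by omega)).symm
  · rw [pv_verify_eval_ge_two (by omega)]
    exact (decide_eq_true (by omega)).symm
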